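-- pv_equiv track=rewrite | github.com/mattya144/ExpertSystemWithPython | pos/pos.py | count_pos_patterns
-- ===== SOURCE A (Python) =====
-- WINDOW_SIZE = 2
--
-- def count_pos_patterns(documents):
--     width = WINDOW_SIZE
--     pos_patterns = []
--     pos_vectors = [[] for _ in range(len(documents))]
--     # define empty array to store pos_vector
--     for docId, document in enumerate(documents):
--         len_doc = len(document)
--         for i in range(len_doc - (width-1)):
--             key_str = ""
--             key_str += document[i][0] # word
--
--             for j in range(1, width):
--                 key_str += " " + document[i+j][1] # POS
--
--             if key_str not in pos_patterns:
--                 pos_patterns.append(key_str)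
--                 # document include pos pattern -> 1 , other　-> 0
--                 for i in range(len(pos_vectors)): # loop for K1, K2, Q
--                     if i == docId:
--                         pos_vectors[i].append(1)
--                     else:
--                         pos_vectors[i].append(0)
--
--             else:
--                 idx = pos_patterns.index(key_str)
--                 pos_vectors[docId][idx] += 1
--
--     return (pos_patterns, pos_vectors)
-- ===== SOURCE B (Python) =====
-- WINDOW_SIZE = 2
--
-- def count_pos_patterns(documents):
--     width = WINDOW_SIZE
--     # Pass 1: extract each document's pattern keys; collect patterns in first-appearance order.
--     doc_keys = []
--     pos_patterns = []
--     seen = set()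
--     for document in documents:
--         keys = []
--         for i in range(len(document) - (width - 1)):
--             key_str = document[i][0]
--             for j in range(1, width):
--                 key_str += " " + document[i + j][1]
--             keys.append(key_str)
--             if key_str not in seen:
--                 seen.add(key_str)
--                 pos_patterns.append(key_str)
--         doc_keys.append(keys)
--     # Pass 2: preallocate each count vector and tally occurrences via a pattern->column index.
--     index = {p: c for c, p in enumerate(pos_patterns)}
--     pos_vectors = []
--     for keys in doc_keys:
--         vec = [0] * len(pos_patterns)
--         for k in keys:
--             vec[index[k]] += 1
--         pos_vectors.append(vec)
--     return (pos_patterns, pos_vectors)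
-- ===== Notes on version B (the rewrite author's own statement) =====
-- stated objective: alternative
-- what changed: Two-pass rewrite: pass 1 extracts every document's key list and builds pos_patterns in first-appearance order with a seen-set; pass 2 preallocates each count vector as [0]*len(pos_patterns) and tallies via a pattern->column dict, replacing A's interleaved list membership test, list.index scan and append-a-zero-column-to-every-row vector growth.
import Mathlib
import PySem

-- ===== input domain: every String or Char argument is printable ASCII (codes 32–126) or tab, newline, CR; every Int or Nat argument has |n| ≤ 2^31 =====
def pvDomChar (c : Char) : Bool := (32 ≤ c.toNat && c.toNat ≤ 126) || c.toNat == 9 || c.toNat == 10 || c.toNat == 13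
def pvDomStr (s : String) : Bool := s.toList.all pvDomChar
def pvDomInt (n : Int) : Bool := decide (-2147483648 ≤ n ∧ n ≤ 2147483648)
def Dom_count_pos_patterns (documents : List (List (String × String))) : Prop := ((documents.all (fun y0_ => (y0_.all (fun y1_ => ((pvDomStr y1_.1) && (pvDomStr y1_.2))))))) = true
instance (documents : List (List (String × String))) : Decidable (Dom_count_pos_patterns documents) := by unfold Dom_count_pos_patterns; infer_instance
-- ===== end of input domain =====

-- B replaces A's interleaved pattern-list membership/index scans and column-by-column vector
-- growth with two passes: key extraction + first-appearance pattern list, then preallocated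
-- count vectors filled via a pattern→column dict (objective: alternative decomposition).

-- ===== PORT A =====
-- Literal port of A. 'for i in range(len(pos_vectors))' with per-row append is rendered as a
-- map over enumerate; pos_vectors[docId] uses docId.toNat (docId from enumerate is ≥ 0).
def count_pos_patterns (documents : List (List (String × String))) : List String × List (List Int) :=
  let width : Int := 2
  let init : List String × List (List Int) := ([], documents.map (fun _ => []))
  (PySem.List.enumerate documents).foldl (fun st pr =>
    let docId : Int := pr.1
    let document := pr.2
    let len_doc : Int := document.length
    (PySem.List.pyRange 0 (len_doc - (width - 1)) 1).foldl (fun st i =>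
      let key0 : String := "" ++ (PySem.List.pyGetD document i ("", "")).1
      let key_str : String := (PySem.List.pyRange 1 width 1).foldl (fun ks j =>
        ks ++ " " ++ (PySem.List.pyGetD document (i + j) ("", "")).2) key0
      if key_str ∉ st.1 then
        (st.1 ++ [key_str],
         (PySem.List.enumerate st.2).map (fun q =>
           if q.1 = docId then q.2 ++ [(1 : Int)] else q.2 ++ [(0 : Int)]))
      else
        let idx := (PySem.List.index? st.1 key_str).getD 0
        (st.1, st.2.modify docId.toNat (fun v => v.modify idx (· + 1)))) st) init

-- ===== PORT B =====
-- Literal port of Source B. Pass-1 state is (doc_keys, pos_patterns, seen : PySem.Set);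
-- the pattern→column dict has Int values (Python ints); vec[index[k]] += 1 is modify at that
-- index (always a valid non-negative index, so .toNat is exact).
def count_pos_patterns_alt (documents : List (List (String × String))) : List String × List (List Int) :=
  let width : Int := 2
  let p1 := documents.foldl
    (fun (st : List (List String) × List String × PySem.Set String) document =>
      let inner := (PySem.List.pyRange 0 ((document.length : Int) - (width - 1)) 1).foldl
        (fun (q : List String × List String × PySem.Set String) i =>
          let key0 : String := (PySem.List.pyGetD document i ("", "")).1
          let key_str : String := (PySem.List.pyRange 1 width 1).foldl (fun ks j =>
            ks ++ " " ++ (PySem.List.pyGetD document (i + j) ("", "")).2) key0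
          let keys := q.1 ++ [key_str]
          if PySem.Set.contains q.2.2 key_str then (keys, q.2.1, q.2.2)
          else (keys, q.2.1 ++ [key_str], PySem.Set.add q.2.2 key_str))
        ([], st.2.1, st.2.2)
      (st.1 ++ [inner.1], inner.2.1, inner.2.2))
    ([], [], PySem.Set.empty)
  let doc_keys := p1.1
  let pos_patterns := p1.2.1
  let index : PySem.Dict String Int :=
    (PySem.List.enumerate pos_patterns).foldl (fun d q => d.insert q.2 q.1) PySem.Dict.empty
  let pos_vectors := doc_keys.map (fun keys =>
    keys.foldl (fun vec k => vec.modify (index.getD k 0).toNat (· + 1))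
      (List.replicate pos_patterns.length (0 : Int)))
  (pos_patterns, pos_vectors)

-- ===== PRECONDITION & SPEC =====
def Spec_count_pos_patterns (documents : List (List (String × String))) (out : List String × List (List Int)) : Prop := out = count_pos_patterns_alt documents
instance (documents : List (List (String × String))) (out : List String × List (List Int)) : Decidable (Spec_count_pos_patterns documents out) := by unfold Spec_count_pos_patterns; infer_instance

-- ===== CLAIM (what is proved, stated in full; the proofs are below) =====
def Claim_equal_count_pos_patterns : Prop := ∀ (documents : List (List (String × String))), Dom_count_pos_patterns documents → Spec_count_pos_patterns documents (count_pos_patterns documents)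

-- ===== LEMMAS AND PROOFS =====

-- common vocabulary
def pvKeyAt (d : List (String × String)) (i : Int) : String :=
  (PySem.List.pyGetD d i ("", "")).1 ++ " " ++ (PySem.List.pyGetD d (i + 1) ("", "")).2

def pvKeysOf (d : List (String × String)) : List String :=
  (PySem.List.pyRange 0 ((d.length : Int) - 1) 1).map (pvKeyAt d)

def pvFa (acc : List String) (k : String) : List String :=
  if k ∈ acc then acc else acc ++ [k]

def pvCnt (ks : List String) (p : String) : Int := (ks.count p : Int)

def pvVec (pats ks : List String) : List Int := pats.map (pvCnt ks)

def pvVecs (pats : List String) (kss : List (List String)) (r : Nat) : List (List Int) :=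
  kss.map (pvVec pats) ++ List.replicate r (pvVec pats [])

-- facts about pvFa
theorem pvFa_nodup (l : List String) (acc : List String) (h : acc.Nodup) :
    (l.foldl pvFa acc).Nodup := by
  induction l generalizing acc with
  | nil => exact h
  | cons k t ih =>
    simp only [List.foldl_cons]
    apply ih
    unfold pvFa
    split <;> rename_i hk
    · exact h
    · rw [List.nodup_append]
      refine ⟨h, List.nodup_singleton k, ?_⟩
      intro a ha b hb
      simp only [List.mem_singleton] at hb
      subst hb
      exact fun he => hk (he ▸ ha)

theorem pvFa_mem (l : List String) (acc : List String) (x : String) :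
    x ∈ l.foldl pvFa acc ↔ x ∈ acc ∨ x ∈ l := by
  induction l generalizing acc with
  | nil => simp
  | cons k t ih =>
    simp only [List.foldl_cons, ih]
    unfold pvFa
    split <;> rename_i hk
    · rw [List.mem_cons]
      constructor
      · tauto
      · rintro (h1 | rfl | h1)
        · tauto
        · exact Or.inl hk
        · tauto
    · simp only [List.mem_append, List.mem_cons]
      tauto

-- counting facts
theorem pvCnt_append_singleton (l : List String) (k p : String) :
    pvCnt (l ++ [k]) p = pvCnt l p + if p = k then 1 else 0 := by
  unfold pvCnt
  rw [List.count_append]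
  by_cases h : p = k
  · subst h
    simp
  · have h0 : List.count p [k] = 0 := List.count_eq_zero.2 (by simp [h])
    simp [h0, h]

theorem pvCnt_eq_zero (l : List String) (p : String) (h : p ∉ l) : pvCnt l p = 0 := by
  simp [pvCnt, List.count_eq_zero.2 h]

theorem pvVec_zero (pats : List String) : pvVec pats [] = List.replicate pats.length (0 : Int) := by
  unfold pvVec
  rw [show (pvCnt []) = fun _ : String => (0 : Int) from funext fun p => by simp [pvCnt]]
  exact List.map_const'

theorem pvVec_snoc (pats cur : List String) (k : String) :
    pvVec pats (cur ++ [k]) = pats.map (fun p => if p = k then pvCnt cur p + 1 else pvCnt cur p) := by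
  unfold pvVec
  apply List.map_congr_left
  intro p _
  by_cases h : p = k <;> simp [pvCnt_append_singleton, h]

theorem pvVec_extend_zero (pats l : List String) (k : String)
    (hl : ∀ x ∈ l, x ∈ pats) (hk : k ∉ pats) :
    pvVec pats l ++ [0] = pvVec (pats ++ [k]) l := by
  unfold pvVec
  rw [List.map_append]
  congr 1
  simp [pvCnt_eq_zero l k (fun h => hk (hl k h))]

theorem pvVec_extend_one (pats cur : List String) (k : String)
    (hc : ∀ x ∈ cur, x ∈ pats) (hk : k ∉ pats) :
    pvVec pats cur ++ [1] = pvVec (pats ++ [k]) (cur ++ [k]) := by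
  unfold pvVec
  rw [List.map_append]
  congr 1
  · apply List.map_congr_left
    intro p hp
    have hpk : p ≠ k := fun he => hk (he ▸ hp)
    simp [pvCnt_append_singleton, hpk]
  · have : k ∉ cur := fun h => hk (hc k h)
    simp [pvCnt_append_singleton, pvCnt_eq_zero cur k this]

-- single pvFa step facts
theorem pvFa_mem1 (pats : List String) (k x : String) :
    x ∈ pvFa pats k ↔ x ∈ pats ∨ x = k := by
  unfold pvFa
  split <;> rename_i hk
  · constructor
    · tauto
    · rintro (h | rfl)
      · exact h
      · exact hk
  · simp

theorem pvFa_nodup1 (pats : List String) (k : String) (h : pats.Nodup) : (pvFa pats k).Nodup := by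
  have := pvFa_nodup [k] pats h
  simpa using this

-- first-index lemmas
theorem pv_index? (pats : List String) (k : String) (hk : k ∈ pats) :
    (PySem.List.index? pats k).getD 0 = List.idxOf k pats := by
  induction pats with
  | nil => cases hk
  | cons p t ih =>
    by_cases hpk : p = k
    · subst hpk
      rw [PySem.List.index?_cons_self]
      simp [List.idxOf_cons_self]
    · rw [PySem.List.index?_cons_of_ne t hpk]
      have hkt : k ∈ t := by
        rcases List.mem_cons.1 hk with h | h
        · exact absurd h.symm hpk
        · exact h
      rcases Option.isSome_iff_exists.1 ((PySem.List.index?_isSome_iff t k).2 hkt) with ⟨n, hn⟩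
      have hidx : List.idxOf k t = n := by
        have := ih hkt
        rw [hn] at this
        simpa using this.symm
      rw [hn]
      simp [hpk, hidx]

theorem pv_modify_map (pats : List String) (f : String → Int) (k : String)
    (hnd : pats.Nodup) (hk : k ∈ pats) :
    (pats.map f).modify (List.idxOf k pats) (· + 1) =
      pats.map (fun p => if p = k then f p + 1 else f p) := by
  induction pats with
  | nil => cases hk
  | cons p t ih =>
    rcases List.nodup_cons.1 hnd with ⟨hpt, hndt⟩
    by_cases hpk : p = k
    · subst hpk
      rw [List.idxOf_cons_self]
      simp only [List.map_cons]
      rw [show ((f p :: t.map f).modify 0 fun x => x + 1) = (f p + 1) :: t.map f from by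
        simp [List.modify]]
      simp only [if_true]
      congr 1
      symm
      apply List.map_congr_left
      intro x hx
      have hxp : ¬ x = p := by
        intro he
        exact hpt (he ▸ hx)
      rw [if_neg hxp]
    · have hkt : k ∈ t := by
        rcases List.mem_cons.1 hk with h | h
        · exact absurd h.symm hpk
        · exact h
      have hIdx : List.idxOf k (p :: t) = List.idxOf k t + 1 := by simp [hpk]
      rw [hIdx]
      simp only [List.map_cons]
      rw [show ((f p :: t.map f).modify (List.idxOf k t + 1) fun x => x + 1)
          = f p :: (t.map f).modify (List.idxOf k t) (fun x => x + 1) from by simp [List.modify]]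
      congr 1
      · rw [if_neg hpk]
      · exact ih hndt hkt

-- modify at the junction of an append
theorem pv_modify_append (xs : List (List Int)) (y : List Int) (ys : List (List Int))
    (f : List Int → List Int) :
    (xs ++ y :: ys).modify xs.length f = xs ++ f y :: ys := by
  induction xs with
  | nil => simp [List.modify]
  | cons x t ih =>
    simp only [List.cons_append, List.length_cons]
    rw [show (x :: (t ++ y :: ys)).modify (t.length + 1) f
        = x :: ((t ++ y :: ys).modify t.length f) from by simp [List.modify]]
    rw [ih]

-- mapping an index-tested function over enumerate
theorem pv_enum_map_ne (ys : List (List Int)) (s t : Int) (f g : List Int → List Int)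
    (h : t < s) :
    (PySem.List.enumerate ys s).map (fun q => if q.1 = t then g q.2 else f q.2) = ys.map f := by
  induction ys generalizing s with
  | nil => simp [PySem.List.enumerate]
  | cons y ys ih =>
    rw [PySem.List.enumerate_cons]
    simp only [List.map_cons]
    have hne : s ≠ t := by omega
    rw [if_neg hne, ih (s + 1) (by omega)]

theorem pv_enum_map_split (xs : List (List Int)) (y : List Int) (ys : List (List Int))
    (s : Int) (f g : List Int → List Int) :
    (PySem.List.enumerate (xs ++ y :: ys) s).map
        (fun q => if q.1 = s + (xs.length : Int) then g q.2 else f q.2) =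
      xs.map f ++ g y :: ys.map f := by
  induction xs generalizing s with
  | nil =>
    simp only [List.nil_append, PySem.List.enumerate_cons, List.map_cons, List.length_nil,
      Nat.cast_zero, add_zero, List.map_nil]
    rw [pv_enum_map_ne ys (s + 1) s f g (by omega)]
    simp
  | cons x xs ih =>
    simp only [List.cons_append, PySem.List.enumerate_cons, List.map_cons, List.length_cons]
    have hne : s ≠ s + ((xs.length : Nat) + 1 : Nat) := by push_cast; omega
    rw [if_neg hne]
    congr 1
    rw [← ih (s + 1)]
    apply List.map_congr_left
    intro q _
    apply if_congr _ rfl rfl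
    constructor <;> intro h <;> (push_cast at h ⊢; omega)

-- ===== A-side: one key step =====
def pvStepKey (docId : Int) (st : List String × List (List Int)) (k : String) :
    List String × List (List Int) :=
  if k ∉ st.1 then
    (st.1 ++ [k],
     (PySem.List.enumerate st.2).map (fun q =>
       if q.1 = docId then q.2 ++ [(1 : Int)] else q.2 ++ [(0 : Int)]))
  else
    (st.1, st.2.modify docId.toNat (fun v => v.modify ((PySem.List.index? st.1 k).getD 0) (· + 1)))

theorem pvVecs_unfold (pats : List String) (kss0 : List (List String)) (cur : List String) (r : Nat) :
    pvVecs pats (kss0 ++ [cur]) r =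
      kss0.map (pvVec pats) ++ pvVec pats cur :: List.replicate r (pvVec pats []) := by
  simp [pvVecs, List.map_append]

theorem pvA_key (k : String) (pats : List String) (kss0 : List (List String)) (cur : List String)
    (r : Nat) (hnd : pats.Nodup) (h0 : ∀ l ∈ kss0, ∀ x ∈ l, x ∈ pats) (hc : ∀ x ∈ cur, x ∈ pats) :
    pvStepKey (kss0.length : Int) (pats, pvVecs pats (kss0 ++ [cur]) r) k
      = (pvFa pats k, pvVecs (pvFa pats k) (kss0 ++ [cur ++ [k]]) r) := by
  unfold pvStepKey pvFa
  by_cases hk : k ∈ pats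
  · rw [if_neg (by simpa using hk), if_pos hk]
    congr 1
    rw [pvVecs_unfold, pvVecs_unfold]
    have hlen : kss0.length = (kss0.map (pvVec pats)).length := by simp
    have htn : ((kss0.length : Int)).toNat = kss0.length := by simp
    rw [htn, hlen, pv_modify_append]
    congr 1
    rw [pv_index? pats k hk, pvVec, pv_modify_map pats (pvCnt cur) k hnd hk, ← pvVec_snoc]
  · rw [if_pos (by simpa using hk), if_neg hk]
    congr 1
    rw [pvVecs_unfold, pvVecs_unfold]
    have hlen : (kss0.length : Int) = 0 + ((kss0.map (pvVec pats)).length : Int) := by simp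
    rw [hlen, pv_enum_map_split (kss0.map (pvVec pats)) (pvVec pats cur)
      (List.replicate r (pvVec pats [])) 0 (· ++ [0]) (· ++ [1])]
    congr 1
    · rw [List.map_map]
      apply List.map_congr_left
      intro l hl
      exact pvVec_extend_zero pats l k (h0 l hl) hk
    · congr 1
      · exact pvVec_extend_one pats cur k hc hk
      · rw [List.map_replicate]
        congr 1
        exact pvVec_extend_zero pats [] k (by simp) hk

theorem pvA_doc (ks : List String) (pats : List String) (kss0 : List (List String))
    (cur : List String) (r : Nat) (hnd : pats.Nodup) (h0 : ∀ l ∈ kss0, ∀ x ∈ l, x ∈ pats)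
    (hc : ∀ x ∈ cur, x ∈ pats) :
    ks.foldl (pvStepKey (kss0.length : Int)) (pats, pvVecs pats (kss0 ++ [cur]) r)
      = (ks.foldl pvFa pats, pvVecs (ks.foldl pvFa pats) (kss0 ++ [cur ++ ks]) r) := by
  induction ks generalizing pats cur with
  | nil => simp
  | cons k t ih =>
    rw [List.foldl_cons, pvA_key k pats kss0 cur r hnd h0 hc, List.foldl_cons]
    have hnd' : (pvFa pats k).Nodup := pvFa_nodup1 pats k hnd
    have h0' : ∀ l ∈ kss0, ∀ x ∈ l, x ∈ pvFa pats k := by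
      intro l hl x hx
      exact (pvFa_mem1 pats k x).2 (Or.inl (h0 l hl x hx))
    have hc' : ∀ x ∈ cur ++ [k], x ∈ pvFa pats k := by
      intro x hx
      rcases List.mem_append.1 hx with h | h
      · exact (pvFa_mem1 pats k x).2 (Or.inl (hc x h))
      · exact (pvFa_mem1 pats k x).2 (Or.inr (by simpa using h))
    have := ih (pvFa pats k) (cur ++ [k]) hnd' h0' hc'
    rw [this]
    simp

theorem pvA_main (docs : List (List (String × String))) (kss0 : List (List String))
    (pats : List String) (hnd : pats.Nodup) (h0 : ∀ l ∈ kss0, ∀ x ∈ l, x ∈ pats) :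
    (PySem.List.enumerate docs (kss0.length : Int)).foldl
        (fun st pr => (pvKeysOf pr.2).foldl (pvStepKey pr.1) st)
        (pats, pvVecs pats kss0 docs.length)
      = ((docs.flatMap pvKeysOf).foldl pvFa pats,
         pvVecs ((docs.flatMap pvKeysOf).foldl pvFa pats) (kss0 ++ docs.map pvKeysOf) 0) := by
  induction docs generalizing kss0 pats with
  | nil => simp [PySem.List.enumerate]
  | cons d rest ih =>
    rw [PySem.List.enumerate_cons, List.foldl_cons]
    have hsplit : pvVecs pats kss0 (rest.length + 1) = pvVecs pats (kss0 ++ [[]]) rest.length := by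
      rw [pvVecs_unfold, pvVecs, List.replicate_succ, pvVec_zero]
    simp only [List.length_cons]
    rw [hsplit, pvA_doc (pvKeysOf d) pats kss0 [] rest.length hnd h0 (by simp)]
    simp only [List.nil_append]
    set P1 := (pvKeysOf d).foldl pvFa pats with hP1
    have hnd' : P1.Nodup := pvFa_nodup _ _ hnd
    have h0' : ∀ l ∈ kss0 ++ [pvKeysOf d], ∀ x ∈ l, x ∈ P1 := by
      intro l hl x hx
      rcases List.mem_append.1 hl with h | h
      · exact (pvFa_mem _ _ _).2 (Or.inl (h0 l h x hx))
      · have : l = pvKeysOf d := by simpa using h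
        exact (pvFa_mem _ _ _).2 (Or.inr (this ▸ hx))
    have hlen : (kss0.length : Int) + 1 = ((kss0 ++ [pvKeysOf d]).length : Int) := by
      simp
    rw [hlen]
    have := ih (kss0 ++ [pvKeysOf d]) P1 hnd' h0'
    rw [this]
    rw [List.flatMap_cons, List.foldl_append, ← hP1]
    simp

-- ===== B-side lemmas =====
theorem pvB_doc (l : List String) (ks0 pats : List String) :
    l.foldl (fun (q : List String × List String × PySem.Set String) k =>
        if PySem.Set.contains q.2.2 k then (q.1 ++ [k], q.2.1, q.2.2)
        else (q.1 ++ [k], q.2.1 ++ [k], PySem.Set.add q.2.2 k)) (ks0, pats, pats)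
      = (ks0 ++ l, l.foldl pvFa pats, l.foldl pvFa pats) := by
  induction l generalizing ks0 pats with
  | nil => simp
  | cons k t ih =>
    simp only [List.foldl_cons]
    by_cases hk : k ∈ pats
    · rw [if_pos (by simp [PySem.Set.contains, hk]),
        show pvFa pats k = pats from by simp [pvFa, hk], ih (ks0 ++ [k]) pats]
      simp
    · rw [if_neg (by simp [PySem.Set.contains, hk]),
        show PySem.Set.add pats k = pats ++ [k] from by simp [PySem.Set.add, PySem.Set.contains, hk],
        show pvFa pats k = pats ++ [k] from by simp [pvFa, hk], ih (ks0 ++ [k]) (pats ++ [k])]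
      simp

theorem pvDict_absent (l : List (Int × String)) (d : PySem.Dict String Int) (k : String)
    (h : ∀ q ∈ l, q.2 ≠ k) :
    (l.foldl (fun d (q : Int × String) => d.insert q.2 q.1) d).getD k 0 = d.getD k 0 := by
  induction l generalizing d with
  | nil => rfl
  | cons q t ih =>
    rw [List.foldl_cons, ih _ (fun p hp => h p (List.mem_cons_of_mem q hp))]
    exact PySem.Dict.getD_insert_of_ne d _ _ (h q (List.mem_cons_self)).symm

theorem pvDict_index (pats : List String) (s : Int) (d : PySem.Dict String Int) (k : String)
    (hnd : pats.Nodup) (hk : k ∈ pats) :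
    ((PySem.List.enumerate pats s).foldl (fun d (q : Int × String) => d.insert q.2 q.1) d).getD k 0
      = s + (List.idxOf k pats : Int) := by
  induction pats generalizing s d with
  | nil => cases hk
  | cons p t ih =>
    rcases List.nodup_cons.1 hnd with ⟨hpt, hndt⟩
    rw [PySem.List.enumerate_cons, List.foldl_cons]
    by_cases hpk : p = k
    · subst hpk
      have habs : ∀ q ∈ PySem.List.enumerate t (s + 1), q.2 ≠ p := by
        intro q hq
        rcases (PySem.List.mem_enumerate_iff t (s + 1) q).1 hq with ⟨j, hj, rfl⟩
        intro he
        exact hpt (he ▸ List.getElem_mem hj)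
      rw [pvDict_absent _ _ p habs, PySem.Dict.getD_insert_self]
      simp [List.idxOf_cons_self]
    · have hkt : k ∈ t := by
        rcases List.mem_cons.1 hk with h | h
        · exact absurd h.symm hpk
        · exact h
      rw [ih (s + 1) _ hndt hkt]
      have : List.idxOf k (p :: t) = List.idxOf k t + 1 := by simp [hpk]
      rw [this]
      push_cast
      ring

theorem pvB_count (ks : List String) (pats : List String) (f : String → Int)
    (hnd : pats.Nodup) (hks : ∀ k ∈ ks, k ∈ pats) :
    ks.foldl (fun vec k => vec.modify (List.idxOf k pats) (· + 1)) (pats.map f)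
      = pats.map (fun p => f p + pvCnt ks p) := by
  induction ks generalizing f with
  | nil =>
    simp only [List.foldl_nil]
    apply List.map_congr_left
    intro p _
    simp [pvCnt]
  | cons k t ih =>
    rw [List.foldl_cons, pv_modify_map pats f k hnd (hks k List.mem_cons_self)]
    rw [ih (fun p => if p = k then f p + 1 else f p) (fun x hx => hks x (List.mem_cons_of_mem k hx))]
    apply List.map_congr_left
    intro p _
    by_cases h : p = k
    · subst h
      simp [pvCnt]
      ring
    · have hkp : (k == p) = false := by
        simp only [beq_eq_false_iff_ne, ne_eq]
        exact fun he => h he.symm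
      simp [pvCnt, List.count_cons, hkp, h]

theorem pv_foldl_comp {α β σ : Type} (l : List α) (f : α → β) (g : σ → β → σ) (init : σ) :
    l.foldl (fun q i => g q (f i)) init = (l.map f).foldl g init :=
  (List.foldl_map).symm

-- key-string computations reduce to pvKeyAt
theorem pvKeyA (d : List (String × String)) (i : Int) :
    (PySem.List.pyRange 1 2 1).foldl
        (fun ks j => ks ++ " " ++ (PySem.List.pyGetD d (i + j) ("", "")).2)
        ("" ++ (PySem.List.pyGetD d i ("", "")).1) = pvKeyAt d i := by
  rw [show PySem.List.pyRange 1 2 1 = [1] from by decide]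
  simp [pvKeyAt, String.empty_append]

theorem pvKeyB (d : List (String × String)) (i : Int) :
    (PySem.List.pyRange 1 2 1).foldl
        (fun ks j => ks ++ " " ++ (PySem.List.pyGetD d (i + j) ("", "")).2)
        ((PySem.List.pyGetD d i ("", "")).1) = pvKeyAt d i := by
  rw [show PySem.List.pyRange 1 2 1 = [1] from by decide]
  simp [pvKeyAt]

theorem pvB_pass1 (docs : List (List (String × String))) (dks : List (List String))
    (pats : List String) :
    docs.foldl
      (fun (st : List (List String) × List String × PySem.Set String) document =>
        let inner := (PySem.List.pyRange 0 ((document.length : Int) - (2 - 1)) 1).foldl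
          (fun (q : List String × List String × PySem.Set String) i =>
            let key0 : String := (PySem.List.pyGetD document i ("", "")).1
            let key_str : String := (PySem.List.pyRange 1 2 1).foldl (fun ks j =>
              ks ++ " " ++ (PySem.List.pyGetD document (i + j) ("", "")).2) key0
            let keys := q.1 ++ [key_str]
            if PySem.Set.contains q.2.2 key_str then (keys, q.2.1, q.2.2)
            else (keys, q.2.1 ++ [key_str], PySem.Set.add q.2.2 key_str))
          ([], st.2.1, st.2.2)
        (st.1 ++ [inner.1], inner.2.1, inner.2.2))
      (dks, pats, pats)
      = (dks ++ docs.map pvKeysOf,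
         (docs.flatMap pvKeysOf).foldl pvFa pats,
         (docs.flatMap pvKeysOf).foldl pvFa pats) := by
  induction docs generalizing dks pats with
  | nil => simp
  | cons d rest ih =>
    rw [List.foldl_cons]
    have hinner : (PySem.List.pyRange 0 ((d.length : Int) - (2 - 1)) 1).foldl
          (fun (q : List String × List String × PySem.Set String) i =>
            let key0 : String := (PySem.List.pyGetD d i ("", "")).1
            let key_str : String := (PySem.List.pyRange 1 2 1).foldl (fun ks j =>
              ks ++ " " ++ (PySem.List.pyGetD d (i + j) ("", "")).2) key0
            let keys := q.1 ++ [key_str]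
            if PySem.Set.contains q.2.2 key_str then (keys, q.2.1, q.2.2)
            else (keys, q.2.1 ++ [key_str], PySem.Set.add q.2.2 key_str))
          ([], pats, pats)
        = (pvKeysOf d, (pvKeysOf d).foldl pvFa pats, (pvKeysOf d).foldl pvFa pats) := by
      have hfun : (fun (q : List String × List String × PySem.Set String) (i : Int) =>
            let key0 : String := (PySem.List.pyGetD d i ("", "")).1
            let key_str : String := (PySem.List.pyRange 1 2 1).foldl (fun ks j =>
              ks ++ " " ++ (PySem.List.pyGetD d (i + j) ("", "")).2) key0
            let keys := q.1 ++ [key_str]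
            if PySem.Set.contains q.2.2 key_str then (keys, q.2.1, q.2.2)
            else (keys, q.2.1 ++ [key_str], PySem.Set.add q.2.2 key_str))
          = fun q i =>
              (fun (q : List String × List String × PySem.Set String) (k : String) =>
                if PySem.Set.contains q.2.2 k then (q.1 ++ [k], q.2.1, q.2.2)
                else (q.1 ++ [k], q.2.1 ++ [k], PySem.Set.add q.2.2 k)) q (pvKeyAt d i) := by
        funext q i
        simp only [pvKeyB d i]
      rw [show ((d.length : Int) - (2 - 1)) = (d.length : Int) - 1 from by norm_num, hfun,
        pv_foldl_comp (PySem.List.pyRange 0 ((d.length : Int) - 1) 1) (pvKeyAt d)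
          (fun (q : List String × List String × PySem.Set String) (k : String) =>
            if PySem.Set.contains q.2.2 k then (q.1 ++ [k], q.2.1, q.2.2)
            else (q.1 ++ [k], q.2.1 ++ [k], PySem.Set.add q.2.2 k)) ([], pats, pats), pvB_doc]
      simp [pvKeysOf]
    simp only [hinner]
    rw [ih (dks ++ [pvKeysOf d]) ((pvKeysOf d).foldl pvFa pats)]
    rw [List.flatMap_cons, List.foldl_append, List.map_cons, List.append_cons]
    simp

theorem pv_B_eq (documents : List (List (String × String))) :
    count_pos_patterns_alt documents =
      (let P := (documents.flatMap pvKeysOf).foldl pvFa []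
       (P, (documents.map pvKeysOf).map (pvVec P))) := by
  unfold count_pos_patterns_alt
  simp only []
  rw [show (PySem.Set.empty : PySem.Set String) = ([] : List String) from rfl]
  rw [pvB_pass1 documents [] []]
  simp only [List.nil_append]
  set P := (documents.flatMap pvKeysOf).foldl pvFa ([] : List String) with hP
  have hnd : P.Nodup := pvFa_nodup _ _ List.nodup_nil
  congr 1
  apply List.map_congr_left
  intro ks hks
  rcases List.mem_map.1 hks with ⟨d, hd, rfl⟩
  have hsub : ∀ k ∈ pvKeysOf d, k ∈ P := by
    intro k hk
    exact (pvFa_mem _ _ _).2 (Or.inr (List.mem_flatMap.2 ⟨d, hd, hk⟩))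
  rw [show List.replicate P.length (0 : Int) = P.map (fun _ => (0 : Int)) from List.map_const'.symm]
  rw [PySem.List.foldl_congr_mem (pvKeysOf d) _
    (fun vec k => vec.modify (List.idxOf k P) (· + 1)) _
    (by
      intro acc k hk
      have := pvDict_index P 0 PySem.Dict.empty k hnd (hsub k hk)
      rw [this]
      simp)]
  rw [pvB_count (pvKeysOf d) P (fun _ => 0) hnd hsub]
  unfold pvVec
  apply List.map_congr_left
  intro p _
  simp

theorem pv_A_eq (documents : List (List (String × String))) :
    count_pos_patterns documents =
      (let P := (documents.flatMap pvKeysOf).foldl pvFa []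
       (P, (documents.map pvKeysOf).map (pvVec P))) := by
  unfold count_pos_patterns
  simp only []
  have hstep : (fun (st : List String × List (List Int)) (pr : Int × List (String × String)) =>
        (PySem.List.pyRange 0 (((pr.2.length : Int)) - (2 - 1)) 1).foldl
          (fun st i =>
            let key0 : String := "" ++ (PySem.List.pyGetD pr.2 i ("", "")).1
            let key_str : String := (PySem.List.pyRange 1 2 1).foldl (fun ks j =>
              ks ++ " " ++ (PySem.List.pyGetD pr.2 (i + j) ("", "")).2) key0
            if key_str ∉ st.1 then
              (st.1 ++ [key_str],
               (PySem.List.enumerate st.2).map (fun q =>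
                 if q.1 = pr.1 then q.2 ++ [(1 : Int)] else q.2 ++ [(0 : Int)]))
            else
              (st.1, st.2.modify pr.1.toNat (fun v =>
                 v.modify ((PySem.List.index? st.1 key_str).getD 0) (· + 1))))
          st)
      = fun st pr => (pvKeysOf pr.2).foldl (pvStepKey pr.1) st := by
    funext st pr
    have hfun : (fun (st : List String × List (List Int)) (i : Int) =>
          let key0 : String := "" ++ (PySem.List.pyGetD pr.2 i ("", "")).1
          let key_str : String := (PySem.List.pyRange 1 2 1).foldl (fun ks j =>
            ks ++ " " ++ (PySem.List.pyGetD pr.2 (i + j) ("", "")).2) key0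
          if key_str ∉ st.1 then
            (st.1 ++ [key_str],
             (PySem.List.enumerate st.2).map (fun q =>
               if q.1 = pr.1 then q.2 ++ [(1 : Int)] else q.2 ++ [(0 : Int)]))
          else
            (st.1, st.2.modify pr.1.toNat (fun v =>
               v.modify ((PySem.List.index? st.1 key_str).getD 0) (· + 1))))
        = fun st i => pvStepKey pr.1 st (pvKeyAt pr.2 i) := by
      funext st i
      simp only [pvKeyA pr.2 i, pvStepKey]
    rw [hfun, ← List.foldl_map,
      show ((pr.2.length : Int) - (2 - 1)) = (pr.2.length : Int) - 1 from by norm_num]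
    rfl
  rw [hstep]
  have hinit : documents.map (fun _ => ([] : List Int)) = pvVecs [] [] documents.length := by
    simp [pvVecs, pvVec, List.map_const']
  rw [hinit, show (0 : Int) = (([] : List (List String)).length : Int) from by simp]
  rw [pvA_main documents [] [] List.nodup_nil (by simp)]
  simp [pvVecs]

-- ===== VERDICT (by name: the statement is the Claim_ definition above) =====
theorem count_pos_patterns_spec : Claim_equal_count_pos_patterns := by
  intro documents _
  unfold Spec_count_pos_patterns
  rw [pv_A_eq, pv_B_eq]
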